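-- pv_equiv track=rewrite | github.com/skyrim4ev3r/leetcode_solutions | algorithms/2_medium/M/03742_maximum_path_score_in_a_grid/dp.py | maxPathScore
-- ===== SOURCE A (Python) =====
-- from typing import List
--
-- def maxPathScore(grid: List[List[int]], k: int) -> int:
--     rows: int = len(grid)
--     cols: int = len(grid[0])
--
--     dp = [[[-1] * (k + 1) for _ in range(cols)] for _ in range(rows)]
--     dp[0][0][0] = 0
--
--     for i in range(rows):
--         for j in range(cols):
--             score_cell: int = grid[i][j]
--             cost_cell: int = 1 if score_cell != 0 else 0
--
--             if i > 0:
--                 for c in range(k + 1):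
--                     if dp[i - 1][j][c] != -1:
--                         if c + cost_cell <= k:
--                             dp[i][j][c + cost_cell] = max(dp[i][j][c + cost_cell], dp[i - 1][j][c] + score_cell)
--
--             if j > 0:
--                 for c in range(k + 1):
--                     if dp[i][j - 1][c] != -1:
--                         if c + cost_cell <= k:
--                             dp[i][j][c + cost_cell] = max(dp[i][j][c + cost_cell], dp[i][j - 1][c] + score_cell)
--
--     return max(dp[rows - 1][cols - 1])
-- ===== SOURCE B (Python) =====
-- from typing import List
--
-- def maxPathScore(grid: List[List[int]], k: int) -> int:
--     # top-down memoized recursion: solve(i, j) = vector v with v[c] = best score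
--     # reaching (i, j) having spent exactly c budget (-1 = unreachable)
--     rows, cols = len(grid), len(grid[0])
--     memo = {}
--
--     def solve(i: int, j: int) -> List[int]:
--         if (i, j) in memo:
--             return memo[(i, j)]
--         vec = [-1] * (k + 1)
--         if i == 0 and j == 0:
--             vec[0] = 0
--         else:
--             score = grid[i][j]
--             cost = 1 if score != 0 else 0
--             parents = []
--             if i > 0:
--                 parents.append(solve(i - 1, j))
--             if j > 0:
--                 parents.append(solve(i, j - 1))
--             for p in parents:
--                 for c in range(k + 1):
--                     if p[c] != -1 and c + cost <= k:
--                         if p[c] + score > vec[c + cost]: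
--                             vec[c + cost] = p[c] + score
--         memo[(i, j)] = vec
--         return vec
--
--     return max(solve(rows - 1, cols - 1))
-- ===== Notes on version B (the rewrite author's own statement) =====
-- stated objective: alternative
-- what changed: Replaces the bottom-up triple-loop over a full rows*cols*(k+1) DP table with a top-down memoized recursion solve(i,j) that returns the per-cell budget vector, merging the two parent vectors.
import Mathlib
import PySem

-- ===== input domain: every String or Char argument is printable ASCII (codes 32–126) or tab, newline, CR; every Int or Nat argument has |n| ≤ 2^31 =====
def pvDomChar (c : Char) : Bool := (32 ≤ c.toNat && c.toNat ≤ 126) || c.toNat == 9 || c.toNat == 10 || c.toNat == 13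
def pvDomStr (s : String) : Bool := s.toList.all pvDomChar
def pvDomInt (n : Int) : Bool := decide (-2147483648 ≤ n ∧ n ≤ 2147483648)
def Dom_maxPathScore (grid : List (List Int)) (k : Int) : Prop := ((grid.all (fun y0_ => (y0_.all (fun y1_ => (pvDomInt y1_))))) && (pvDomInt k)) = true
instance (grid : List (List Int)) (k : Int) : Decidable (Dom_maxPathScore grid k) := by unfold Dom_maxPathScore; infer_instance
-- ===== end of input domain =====

-- B replaces A's bottom-up triple-loop over a full rows×cols×(k+1) table with a
-- top-down recursion on (i,j) returning the per-cell budget vector (Source B memoizes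
-- that recursion; the memo only caches identical values, so the port drops it).
-- Python's lists with O(1) item assignment are ported as Arrays.

-- ===== PORT A =====
-- dp[a][b][c]; the -1 default is only read in-range under Pre_ (every access A makes is in-range there)
def pvGet3 (dp : Array (Array (Array Int))) (a b c : Nat) : Int :=
  (((dp[a]?.getD #[])[b]?.getD #[])[c]?.getD (-1))

-- dp[i][j][c] = v (always in-range where A executes it under Pre_)
def pvSet3 (dp : Array (Array (Array Int))) (i j c : Nat) (v : Int) : Array (Array (Array Int)) :=
  dp.modify i (fun row => row.modify j (fun vec => vec.setIfInBounds c v))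

-- grid[i][j]; exact on the in-range accesses Pre_ guarantees
def pvCellAt (grid : List (List Int)) (i j : Nat) : Int := (grid.getD i []).getD j 0

-- the inner 'for c in range(k+1)' loop relaxing dp[i][j] from parent dp[pi][pj]
def pvRelaxA (k score : Int) (cost : Nat) (pi pj i j : Nat)
    (dp : Array (Array (Array Int))) : Array (Array (Array Int)) :=
  (List.range (k + 1).toNat).foldl (fun dp (c : Nat) =>
    if pvGet3 dp pi pj c ≠ -1 then
      if (c : Int) + (cost : Int) ≤ k then
        pvSet3 dp i j (c + cost) (max (pvGet3 dp i j (c + cost)) (pvGet3 dp pi pj c + score))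
      else dp
    else dp) dp

-- the body of the double loop for one cell (i, j)
def pvCellStepA (grid : List (List Int)) (k : Int) (dp : Array (Array (Array Int)))
    (i j : Nat) : Array (Array (Array Int)) :=
  let score := pvCellAt grid i j
  let cost : Nat := if score ≠ 0 then 1 else 0
  let dp1 := if 0 < i then pvRelaxA k score cost (i - 1) j i j dp else dp
  if 0 < j then pvRelaxA k score cost i (j - 1) i j dp1 else dp1

def maxPathScore (grid : List (List Int)) (k : Int) : Int :=
  let rows := grid.length
  let cols := (grid.getD 0 []).length
  let dp0 := Array.replicate rows (Array.replicate cols (Array.replicate (k + 1).toNat (-1 : Int)))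
  let dp1 := pvSet3 dp0 0 0 0 0
  let dp := (List.range rows).foldl
    (fun dp i => (List.range cols).foldl (fun dp j => pvCellStepA grid k dp i j) dp) dp1
  (PySem.List.max? (((dp[rows - 1]?.getD #[])[cols - 1]?.getD #[]).toList) (fun x => x)).getD (-1)

-- ===== PORT B =====
-- merge one parent vector p into vec (the 'for c in range(k+1)' loop of Source B)
def pvCombine (k score : Int) (cost : Nat) (vec p : Array Int) : Array Int :=
  (List.range (k + 1).toNat).foldl (fun vec (c : Nat) =>
    if p[c]?.getD (-1) ≠ -1 ∧ (c : Int) + (cost : Int) ≤ k then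
      if p[c]?.getD (-1) + score > vec[c + cost]?.getD (-1) then
        vec.setIfInBounds (c + cost) (p[c]?.getD (-1) + score)
      else vec
    else vec) vec

-- solve(i, j) of Source B (memoization dropped: it caches identical values)
def pvSolve (grid : List (List Int)) (k : Int) (i j : Nat) : Array Int :=
  if i = 0 ∧ j = 0 then (Array.replicate (k + 1).toNat (-1)).setIfInBounds 0 0
  else
    let score := (grid.getD i []).getD j 0  -- grid[i][j]
    let cost : Nat := if score ≠ 0 then 1 else 0
    let parents : List (Array Int) :=
      (if 0 < i then [pvSolve grid k (i - 1) j] else []) ++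
      (if 0 < j then [pvSolve grid k i (j - 1)] else [])
    parents.foldl (fun vec p => pvCombine k score cost vec p)
      (Array.replicate (k + 1).toNat (-1))
termination_by i + j
decreasing_by all_goals omega

def maxPathScore_alt (grid : List (List Int)) (k : Int) : Int :=
  let rows := grid.length
  let cols := (grid.getD 0 []).length
  (PySem.List.max? ((pvSolve grid k (rows - 1) (cols - 1)).toList) (fun x => x)).getD (-1)

-- ===== PRECONDITION & SPEC =====
-- exactly the inputs on which Python A returns: k ≥ 0 (else the budget axis is
-- empty and dp[0][0][0]=0 raises IndexError), a nonempty grid with a nonempty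
-- first row (else grid[0] / dp[0][0][0] raises), and every row at least as long
-- as the first (else grid[i][j] raises for some j < cols)
def Pre_maxPathScore (grid : List (List Int)) (k : Int) : Prop :=
  0 ≤ k ∧ grid ≠ [] ∧ 0 < (grid.getD 0 []).length ∧
    ∀ row ∈ grid, (grid.getD 0 []).length ≤ row.length
instance (grid : List (List Int)) (k : Int) : Decidable (Pre_maxPathScore grid k) := by
  unfold Pre_maxPathScore; infer_instance

def pvWitness_maxPathScore : List (List Int) × Int := ([[0, 2], [3, 0]], 1)

def Spec_maxPathScore (grid : List (List Int)) (k : Int) (out : Int) : Prop := out = maxPathScore_alt grid k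
instance (grid : List (List Int)) (k : Int) (out : Int) : Decidable (Spec_maxPathScore grid k out) := by unfold Spec_maxPathScore; infer_instance

-- ===== CLAIM (what is proved, stated in full; the proofs are below) =====
def Claim_equal_maxPathScore : Prop := ∀ (grid : List (List Int)) (k : Int), Dom_maxPathScore grid k → Pre_maxPathScore grid k → Spec_maxPathScore grid k (maxPathScore grid k)

-- ===== LEMMAS AND PROOFS =====

-- the dp table keeps its rows × cols × (k+1) shape throughout
def pvShape (rows cols K : Nat) (dp : Array (Array (Array Int))) : Prop :=
  dp.size = rows ∧ ∀ a, a < rows →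
    (dp[a]?.getD #[]).size = cols ∧ ∀ b, b < cols → ((dp[a]?.getD #[])[b]?.getD #[]).size = K

-- the invariant of A's row-major double loop: cells processed so far (and the
-- initialised start cell) hold B's vector, all other cells are still -1
def pvInv (grid : List (List Int)) (k : Int) (rows cols : Nat) (i j : Nat)
    (dp : Array (Array (Array Int))) : Prop :=
  ∀ a b c, a < rows → b < cols → c < (k + 1).toNat →
    pvGet3 dp a b c = if a < i ∨ (a = i ∧ b < j) ∨ (a = 0 ∧ b = 0)
              then (pvSolve grid k a b)[c]?.getD (-1) else -1

-- proof-side names for the two loop bodies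
def pvStepA (k score : Int) (cost : Nat) (pi pj i j : Nat)
    (dp : Array (Array (Array Int))) (c : Nat) : Array (Array (Array Int)) :=
  if pvGet3 dp pi pj c ≠ -1 then
    if (c : Int) + (cost : Int) ≤ k then
      pvSet3 dp i j (c + cost) (max (pvGet3 dp i j (c + cost)) (pvGet3 dp pi pj c + score))
    else dp
  else dp

def pvStepB (k score : Int) (cost : Nat) (p vec : Array Int) (c : Nat) : Array Int :=
  if p[c]?.getD (-1) ≠ -1 ∧ (c : Int) + (cost : Int) ≤ k then
    if p[c]?.getD (-1) + score > vec[c + cost]?.getD (-1) then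
      vec.setIfInBounds (c + cost) (p[c]?.getD (-1) + score)
    else vec
  else vec

lemma pvRelaxA_eq (k score : Int) (cost : Nat) (pi pj i j : Nat) (dp : Array (Array (Array Int))) :
    pvRelaxA k score cost pi pj i j dp
      = (List.range (k + 1).toNat).foldl (pvStepA k score cost pi pj i j) dp := rfl

lemma pvCombine_eq (k score : Int) (cost : Nat) (vec p : Array Int) :
    pvCombine k score cost vec p
      = (List.range (k + 1).toNat).foldl (pvStepB k score cost p) vec := rfl

lemma pvGetD_set (xs : Array Int) (n c : Nat) (v : Int) (hn : n < xs.size) :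
    (xs.setIfInBounds n v)[c]?.getD (-1) = if n = c then v else xs[c]?.getD (-1) := by
  simp only [Array.getElem?_setIfInBounds, hn, if_true]
  by_cases h : n = c <;> simp [h]

lemma pvGetD_modify {α : Type} (l : Array α) (i : Nat) (f : α → α) (a : Nat) (d : α) :
    (l.modify i f)[a]?.getD d = if i = a ∧ a < l.size then f (l[a]?.getD d) else l[a]?.getD d := by
  cases hx : l[a]? with
  | none =>
      have ha : l.size ≤ a := by
        by_contra h
        exact absurd hx (by simp [Array.getElem?_eq_getElem (by omega : a < l.size)])
      rw [if_neg (by omega)]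
      simp [Array.getElem?_modify, hx]
  | some x =>
      have ha : a < l.size := by
        by_contra h
        simp [Array.getElem?_eq_none (by omega : l.size ≤ a)] at hx
      simp only [Array.getElem?_modify, hx, Option.map_some, Option.getD_some]
      by_cases hia : i = a
      · subst hia; rw [if_pos rfl, if_pos ⟨rfl, ha⟩]; rfl
      · rw [if_neg hia, if_neg (by tauto)]; rfl

lemma pvGet3_set3_ne (dp : Array (Array (Array Int))) (i j c : Nat) (v : Int) (a b c' : Nat)
    (h : ¬(a = i ∧ b = j ∧ c' = c)) :
    pvGet3 (pvSet3 dp i j c v) a b c' = pvGet3 dp a b c' := by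
  unfold pvGet3 pvSet3
  rw [pvGetD_modify]
  split_ifs with h1
  · obtain ⟨rfl, -⟩ := h1
    rw [pvGetD_modify]
    split_ifs with h2
    · obtain ⟨rfl, -⟩ := h2
      have hcc : ¬(c = c') := by tauto
      simp [hcc]
    · rfl
  · rfl

lemma pvGet3_set3_eq (dp : Array (Array (Array Int))) (i j c : Nat) (v : Int)
    (hi : i < dp.size) (hj : j < (dp[i]?.getD #[]).size)
    (hc : c < ((dp[i]?.getD #[])[j]?.getD #[]).size) :
    pvGet3 (pvSet3 dp i j c v) i j c = v := by
  unfold pvGet3 pvSet3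
  rw [pvGetD_modify, if_pos ⟨rfl, hi⟩, pvGetD_modify, if_pos ⟨rfl, hj⟩]
  simp [hc]

lemma pvShape_set3 (rows cols K : Nat) (dp : Array (Array (Array Int))) (i j c : Nat) (v : Int)
    (hsh : pvShape rows cols K dp) : pvShape rows cols K (pvSet3 dp i j c v) := by
  obtain ⟨h1, h2⟩ := hsh
  refine ⟨by simp [pvSet3, Array.size_modify, h1], ?_⟩
  intro a ha
  obtain ⟨hrow, hvec⟩ := h2 a ha
  unfold pvSet3
  rw [pvGetD_modify]
  split_ifs with hia
  · obtain ⟨rfl, -⟩ := hia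
    refine ⟨by rw [Array.size_modify]; exact hrow, ?_⟩
    intro b hb
    rw [pvGetD_modify]
    split_ifs with hjb
    · obtain ⟨rfl, -⟩ := hjb
      rw [Array.size_setIfInBounds]; exact hvec _ hb
    · exact hvec b hb
  · exact ⟨hrow, hvec⟩

lemma pvShape_init (rows cols K : Nat) :
    pvShape rows cols K (Array.replicate rows (Array.replicate cols (Array.replicate K (-1 : Int)))) := by
  refine ⟨by simp, ?_⟩
  intro a ha
  have h1 : (Array.replicate rows (Array.replicate cols (Array.replicate K (-1 : Int))))[a]?.getD #[]
      = Array.replicate cols (Array.replicate K (-1 : Int)) := by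
    simp [ha]
  rw [h1]
  refine ⟨by simp, fun b hb => ?_⟩
  have h2 : (Array.replicate cols (Array.replicate K (-1 : Int)))[b]?.getD #[]
      = Array.replicate K (-1 : Int) := by
    simp [hb]
  rw [h2]; simp

lemma pvGet3_init (rows cols K : Nat) (a b c : Nat) (ha : a < rows) (hb : b < cols) :
    pvGet3 (Array.replicate rows (Array.replicate cols (Array.replicate K (-1 : Int)))) a b c = -1 := by
  unfold pvGet3
  simp [Array.getElem?_replicate, ha, hb]
  split_ifs <;> rfl

lemma pvCombine_size (k score : Int) (cost : Nat) (vec p : Array Int) :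
    (pvCombine k score cost vec p).size = vec.size := by
  unfold pvCombine
  induction (List.range (k + 1).toNat) generalizing vec with
  | nil => rfl
  | cons c t ih =>
      simp only [List.foldl_cons]
      split_ifs <;> first
        | exact ih vec
        | exact (ih _).trans (Array.size_setIfInBounds ..)

lemma pvFoldCombine_size (k score : Int) (cost : Nat) :
    ∀ (ps : List (Array Int)) (v : Array Int),
      (ps.foldl (fun vec p => pvCombine k score cost vec p) v).size = v.size := by
  intro ps
  induction ps with
  | nil => intro v; rfl
  | cons p t ih => intro v; exact (ih _).trans (pvCombine_size ..)

lemma pvSolve_size (grid : List (List Int)) (k : Int) (i j : Nat) :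
    (pvSolve grid k i j).size = (k + 1).toNat := by
  induction i, j using pvSolve.induct grid k with
  | case1 i j h => rw [pvSolve]; simp [h]
  | case2 i j h ih1 ih2 =>
      rw [pvSolve]
      simp only [if_neg h, pvFoldCombine_size, Array.size_replicate]

-- the parallel run of A's relax loop and B's combine loop over any index list
lemma pvRelax_par (k score : Int) (cost : Nat) (rows cols pi pj i j : Nat)
    (hne : ¬(pi = i ∧ pj = j)) (hi : i < rows) (hj : j < cols) (l : List Nat)
    (dp : Array (Array (Array Int))) (vec p : Array Int)
    (hsh : pvShape rows cols (k + 1).toNat dp)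
    (hlen : vec.size = (k + 1).toNat)
    (hp : ∀ c, c < (k + 1).toNat → p[c]?.getD (-1) = pvGet3 dp pi pj c)
    (hv : ∀ c, c < (k + 1).toNat → vec[c]?.getD (-1) = pvGet3 dp i j c)
    (hl : ∀ c ∈ l, c < (k + 1).toNat) :
    pvShape rows cols (k + 1).toNat (l.foldl (pvStepA k score cost pi pj i j) dp) ∧
    (∀ a b c, ¬(a = i ∧ b = j) →
        pvGet3 (l.foldl (pvStepA k score cost pi pj i j) dp) a b c = pvGet3 dp a b c) ∧
    (l.foldl (pvStepB k score cost p) vec).size = (k + 1).toNat ∧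
    (∀ c, c < (k + 1).toNat →
        (l.foldl (pvStepB k score cost p) vec)[c]?.getD (-1)
          = pvGet3 (l.foldl (pvStepA k score cost pi pj i j) dp) i j c) := by
  induction l generalizing dp vec with
  | nil => exact ⟨hsh, fun _ _ _ _ => rfl, hlen, fun c hc => hv c hc⟩
  | cons c0 t ih =>
      have hc0 : c0 < (k + 1).toNat := hl c0 List.mem_cons_self
      simp only [List.foldl_cons]
      have hpc0 : p[c0]?.getD (-1) = pvGet3 dp pi pj c0 := hp c0 hc0
      -- one step preserves all the invariants
      have step : pvShape rows cols (k + 1).toNat (pvStepA k score cost pi pj i j dp c0) ∧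
          (∀ a b c, ¬(a = i ∧ b = j) →
            pvGet3 (pvStepA k score cost pi pj i j dp c0) a b c = pvGet3 dp a b c) ∧
          (pvStepB k score cost p vec c0).size = (k + 1).toNat ∧
          (∀ c, c < (k + 1).toNat →
            p[c]?.getD (-1) = pvGet3 (pvStepA k score cost pi pj i j dp c0) pi pj c) ∧
          (∀ c, c < (k + 1).toNat →
            (pvStepB k score cost p vec c0)[c]?.getD (-1)
              = pvGet3 (pvStepA k score cost pi pj i j dp c0) i j c) := by
        by_cases hA : pvGet3 dp pi pj c0 = -1
        · have e1 : pvStepA k score cost pi pj i j dp c0 = dp := by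
            simp [pvStepA, hA]
          have e2 : pvStepB k score cost p vec c0 = vec := by
            simp only [pvStepB]; rw [hpc0, if_neg (fun h => h.1 hA)]
          rw [e1, e2]
          exact ⟨hsh, fun _ _ _ _ => rfl, hlen, hp, hv⟩
        · by_cases hle : (c0 : Int) + (cost : Int) ≤ k
          · have hcc : c0 + cost < (k + 1).toNat := by omega
            have hold : vec[c0 + cost]?.getD (-1) = pvGet3 dp i j (c0 + cost) := hv _ hcc
            have hbi : i < dp.size := by rw [hsh.1]; exact hi
            have hbj : j < (dp[i]?.getD #[]).size := by rw [(hsh.2 i hi).1]; exact hj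
            have hbc : c0 + cost < ((dp[i]?.getD #[])[j]?.getD #[]).size := by
              rw [(hsh.2 i hi).2 j hj]; exact hcc
            have e1 : pvStepA k score cost pi pj i j dp c0
                = pvSet3 dp i j (c0 + cost)
                    (max (pvGet3 dp i j (c0 + cost)) (pvGet3 dp pi pj c0 + score)) := by
              simp [pvStepA, hA, hle]
            have e2 : pvStepB k score cost p vec c0
                = if pvGet3 dp pi pj c0 + score > pvGet3 dp i j (c0 + cost) then
                    vec.setIfInBounds (c0 + cost) (pvGet3 dp pi pj c0 + score)
                  else vec := by
              simp only [pvStepB]; rw [hpc0, hold, if_pos ⟨hA, hle⟩]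
            refine ⟨?_, ?_, ?_, ?_, ?_⟩
            · rw [e1]; exact pvShape_set3 _ _ _ _ _ _ _ _ hsh
            · intro a b c habc
              rw [e1]
              exact pvGet3_set3_ne _ _ _ _ _ _ _ _ (by tauto)
            · rw [e2]; split_ifs <;> simp [hlen]
            · intro c hc
              rw [e1, pvGet3_set3_ne _ _ _ _ _ _ _ _ (by tauto)]
              exact hp c hc
            · intro c hc
              rw [e1, e2]
              by_cases hgt : pvGet3 dp pi pj c0 + score > pvGet3 dp i j (c0 + cost)
              · rw [if_pos hgt, pvGetD_set vec (c0 + cost) c _ (by omega)]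
                have hm : max (pvGet3 dp i j (c0 + cost)) (pvGet3 dp pi pj c0 + score)
                    = pvGet3 dp pi pj c0 + score := max_eq_right (le_of_lt hgt)
                by_cases hceq : c0 + cost = c
                · rw [if_pos hceq, ← hceq, pvGet3_set3_eq dp i j (c0 + cost) _ hbi hbj hbc, hm]
                · rw [if_neg hceq,
                    pvGet3_set3_ne _ _ _ _ _ _ _ _ (fun h => hceq h.2.2.symm)]
                  exact hv c hc
              · rw [if_neg hgt]
                have hm : max (pvGet3 dp i j (c0 + cost)) (pvGet3 dp pi pj c0 + score)
                    = pvGet3 dp i j (c0 + cost) := max_eq_left (by omega)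
                by_cases hceq : c = c0 + cost
                · rw [hceq, pvGet3_set3_eq dp i j (c0 + cost) _ hbi hbj hbc, hm]
                  exact hold
                · rw [pvGet3_set3_ne _ _ _ _ _ _ _ _ (fun h => hceq h.2.2)]
                  exact hv c hc
          · have e1 : pvStepA k score cost pi pj i j dp c0 = dp := by
              simp [pvStepA, hA, hle]
            have e2 : pvStepB k score cost p vec c0 = vec := by
              simp only [pvStepB]; rw [if_neg (fun h => hle h.2)]
            rw [e1, e2]
            exact ⟨hsh, fun _ _ _ _ => rfl, hlen, hp, hv⟩
      obtain ⟨hsh1, hoff1, hlen1, hp1, hv1⟩ := step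
      obtain ⟨ihsh, ihoff, ihlen, ihv⟩ := ih (pvStepA k score cost pi pj i j dp c0)
        (pvStepB k score cost p vec c0) hsh1 hlen1 hp1 hv1
        (fun c hc => hl c (List.mem_cons_of_mem _ hc))
      exact ⟨ihsh, fun a b c h => (ihoff a b c h).trans (hoff1 a b c h), ihlen, ihv⟩

lemma pvInv_update (grid : List (List Int)) (k : Int) (rows cols i j : Nat)
    (dp dp' : Array (Array (Array Int)))
    (hInv : pvInv grid k rows cols i j dp)
    (hoff : ∀ a b c, ¬(a = i ∧ b = j) → pvGet3 dp' a b c = pvGet3 dp a b c)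
    (hat : ∀ c, c < (k + 1).toNat → pvGet3 dp' i j c = (pvSolve grid k i j)[c]?.getD (-1)) :
    pvInv grid k rows cols i (j + 1) dp' := by
  intro a b c ha hb hc
  by_cases hab : a = i ∧ b = j
  · obtain ⟨rfl, rfl⟩ := hab
    rw [hat c hc, if_pos (show a < a ∨ (a = a ∧ b < b + 1) ∨ (a = 0 ∧ b = 0) by omega)]
  · rw [hoff a b c hab, hInv a b c ha hb hc]
    by_cases hcond : a < i ∨ (a = i ∧ b < j) ∨ (a = 0 ∧ b = 0)
    · rw [if_pos hcond,
        if_pos (show a < i ∨ (a = i ∧ b < j + 1) ∨ (a = 0 ∧ b = 0) by omega)]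
    · rw [if_neg hcond,
        if_neg (show ¬(a < i ∨ (a = i ∧ b < j + 1) ∨ (a = 0 ∧ b = 0)) by omega)]

-- pvRelax_par specialised to pvRelaxA / pvCombine with a solved parent vector
lemma pvRelax_apply (k score : Int) (cost : Nat) (rows cols pi pj i j : Nat)
    (hne : ¬(pi = i ∧ pj = j)) (hi : i < rows) (hj : j < cols)
    (dp : Array (Array (Array Int))) (vec p : Array Int)
    (hsh : pvShape rows cols (k + 1).toNat dp)
    (hlen : vec.size = (k + 1).toNat)
    (hp : ∀ c, c < (k + 1).toNat → p[c]?.getD (-1) = pvGet3 dp pi pj c)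
    (hv : ∀ c, c < (k + 1).toNat → vec[c]?.getD (-1) = pvGet3 dp i j c) :
    pvShape rows cols (k + 1).toNat (pvRelaxA k score cost pi pj i j dp) ∧
    (∀ a b c, ¬(a = i ∧ b = j) →
        pvGet3 (pvRelaxA k score cost pi pj i j dp) a b c = pvGet3 dp a b c) ∧
    (pvCombine k score cost vec p).size = (k + 1).toNat ∧
    (∀ c, c < (k + 1).toNat →
        (pvCombine k score cost vec p)[c]?.getD (-1)
          = pvGet3 (pvRelaxA k score cost pi pj i j dp) i j c) := by
  rw [pvRelaxA_eq, pvCombine_eq]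
  exact pvRelax_par k score cost rows cols pi pj i j hne hi hj _ dp vec p hsh hlen hp hv
    (fun c hc => List.mem_range.mp hc)

lemma pvCellStepA_zero_zero (grid : List (List Int)) (k : Int)
    (dp : Array (Array (Array Int))) : pvCellStepA grid k dp 0 0 = dp := by
  simp [pvCellStepA]

lemma pvCellStepA_zero_pos (grid : List (List Int)) (k : Int)
    (dp : Array (Array (Array Int))) (j : Nat) (hj0 : 0 < j) :
    pvCellStepA grid k dp 0 j
      = pvRelaxA k (pvCellAt grid 0 j) (if pvCellAt grid 0 j ≠ 0 then 1 else 0)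
          0 (j - 1) 0 j dp := by
  simp only [pvCellStepA]
  rw [if_neg (lt_irrefl 0), if_pos hj0]

lemma pvCellStepA_pos_zero (grid : List (List Int)) (k : Int)
    (dp : Array (Array (Array Int))) (i : Nat) (hi0 : 0 < i) :
    pvCellStepA grid k dp i 0
      = pvRelaxA k (pvCellAt grid i 0) (if pvCellAt grid i 0 ≠ 0 then 1 else 0)
          (i - 1) 0 i 0 dp := by
  simp only [pvCellStepA]
  rw [if_pos hi0, if_neg (lt_irrefl 0)]

lemma pvCellStepA_pos_pos (grid : List (List Int)) (k : Int)
    (dp : Array (Array (Array Int))) (i j : Nat) (hi0 : 0 < i) (hj0 : 0 < j) :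
    pvCellStepA grid k dp i j
      = pvRelaxA k (pvCellAt grid i j) (if pvCellAt grid i j ≠ 0 then 1 else 0)
          i (j - 1) i j
          (pvRelaxA k (pvCellAt grid i j) (if pvCellAt grid i j ≠ 0 then 1 else 0)
            (i - 1) j i j dp) := by
  simp only [pvCellStepA]
  rw [if_pos hi0, if_pos hj0]

lemma pvCell_step (grid : List (List Int)) (k : Int) (rows cols i j : Nat)
    (hi : i < rows) (hj : j < cols)
    (dp : Array (Array (Array Int)))
    (hsh : pvShape rows cols (k + 1).toNat dp)
    (hInv : pvInv grid k rows cols i j dp) :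
    pvShape rows cols (k + 1).toNat (pvCellStepA grid k dp i j) ∧
    pvInv grid k rows cols i (j + 1) (pvCellStepA grid k dp i j) := by
  by_cases hz : i = 0 ∧ j = 0
  · obtain ⟨rfl, rfl⟩ := hz
    rw [pvCellStepA_zero_zero]
    refine ⟨hsh, pvInv_update grid k rows cols 0 0 dp dp hInv (fun _ _ _ _ => rfl)
      (fun c hc => ?_)⟩
    rw [hInv 0 0 c hi hj hc,
      if_pos (show (0:Nat) < 0 ∨ ((0:Nat) = 0 ∧ (0:Nat) < 0) ∨ ((0:Nat) = 0 ∧ (0:Nat) = 0) by tauto)]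
  · have hbase : ∀ c, c < (k + 1).toNat →
        (Array.replicate (k + 1).toNat (-1 : Int))[c]?.getD (-1) = pvGet3 dp i j c := by
      intro c hc
      rw [hInv i j c hi hj hc,
        if_neg (show ¬(i < i ∨ (i = i ∧ j < j) ∨ (i = 0 ∧ j = 0)) by omega)]
      simp [hc]
    have hup : 0 < i → ∀ c, c < (k + 1).toNat →
        (pvSolve grid k (i - 1) j)[c]?.getD (-1) = pvGet3 dp (i - 1) j c := by
      intro hi0 c hc
      rw [hInv (i - 1) j c (by omega) hj hc,
        if_pos (show i - 1 < i ∨ (i - 1 = i ∧ j < j) ∨ (i - 1 = 0 ∧ j = 0) by omega)]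
    have hleft : 0 < j → ∀ c, c < (k + 1).toNat →
        (pvSolve grid k i (j - 1))[c]?.getD (-1) = pvGet3 dp i (j - 1) c := by
      intro hj0 c hc
      rw [hInv i (j - 1) c hi (by omega) hc,
        if_pos (show i < i ∨ (i = i ∧ j - 1 < j) ∨ (i = 0 ∧ j - 1 = 0) by omega)]
    rcases Nat.eq_zero_or_pos i with hi0 | hi0
    · subst hi0
      have hj0 : 0 < j := by omega
      have hVeq : pvSolve grid k 0 j
          = pvCombine k (pvCellAt grid 0 j) (if pvCellAt grid 0 j ≠ 0 then 1 else 0)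
              (Array.replicate (k + 1).toNat (-1)) (pvSolve grid k 0 (j - 1)) := by
        rw [pvSolve, if_neg hz]
        simp only [show (grid.getD 0 []).getD j 0 = pvCellAt grid 0 j from rfl]
        rw [if_neg (lt_irrefl 0), if_pos hj0]
        simp only [List.nil_append, List.foldl_cons, List.foldl_nil]
      obtain ⟨hsh', hoff, hlen', hvc⟩ := pvRelax_apply k (pvCellAt grid 0 j)
        (if pvCellAt grid 0 j ≠ 0 then 1 else 0) rows cols 0 (j - 1) 0 j
        (by omega) hi hj dp (Array.replicate (k + 1).toNat (-1)) (pvSolve grid k 0 (j - 1))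
        hsh (by simp) (hleft hj0) hbase
      rw [pvCellStepA_zero_pos grid k dp j hj0]
      exact ⟨hsh', pvInv_update grid k rows cols 0 j _ _ hInv hoff
        (fun c hc => by rw [← hvc c hc, hVeq])⟩
    · rcases Nat.eq_zero_or_pos j with hj0 | hj0
      · subst hj0
        have hVeq : pvSolve grid k i 0
            = pvCombine k (pvCellAt grid i 0) (if pvCellAt grid i 0 ≠ 0 then 1 else 0)
                (Array.replicate (k + 1).toNat (-1)) (pvSolve grid k (i - 1) 0) := by
          rw [pvSolve, if_neg hz]
          simp only [show (grid.getD i []).getD 0 0 = pvCellAt grid i 0 from rfl]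
          rw [if_pos hi0, if_neg (lt_irrefl 0)]
          simp only [List.append_nil, List.foldl_cons, List.foldl_nil]
        obtain ⟨hsh', hoff, hlen', hvc⟩ := pvRelax_apply k (pvCellAt grid i 0)
          (if pvCellAt grid i 0 ≠ 0 then 1 else 0) rows cols (i - 1) 0 i 0
          (by omega) hi hj dp (Array.replicate (k + 1).toNat (-1)) (pvSolve grid k (i - 1) 0)
          hsh (by simp) (hup hi0) hbase
        rw [pvCellStepA_pos_zero grid k dp i hi0]
        exact ⟨hsh', pvInv_update grid k rows cols i 0 _ _ hInv hoff
          (fun c hc => by rw [← hvc c hc, hVeq])⟩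
      · -- both parents
        have hVeq : pvSolve grid k i j
            = pvCombine k (pvCellAt grid i j) (if pvCellAt grid i j ≠ 0 then 1 else 0)
                (pvCombine k (pvCellAt grid i j) (if pvCellAt grid i j ≠ 0 then 1 else 0)
                  (Array.replicate (k + 1).toNat (-1)) (pvSolve grid k (i - 1) j))
                (pvSolve grid k i (j - 1)) := by
          rw [pvSolve, if_neg hz]
          simp only [show (grid.getD i []).getD j 0 = pvCellAt grid i j from rfl]
          rw [if_pos hi0, if_pos hj0]
          simp only [List.cons_append, List.nil_append, List.foldl_cons, List.foldl_nil]
        obtain ⟨hsh1, hoff1, hlen1, hvc1⟩ := pvRelax_apply k (pvCellAt grid i j)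
          (if pvCellAt grid i j ≠ 0 then 1 else 0) rows cols (i - 1) j i j
          (by omega) hi hj dp (Array.replicate (k + 1).toNat (-1)) (pvSolve grid k (i - 1) j)
          hsh (by simp) (hup hi0) hbase
        obtain ⟨hsh2, hoff2, hlen2, hvc2⟩ := pvRelax_apply k (pvCellAt grid i j)
          (if pvCellAt grid i j ≠ 0 then 1 else 0) rows cols i (j - 1) i j
          (by omega) hi hj
          (pvRelaxA k (pvCellAt grid i j) (if pvCellAt grid i j ≠ 0 then 1 else 0) (i - 1) j i j dp)
          (pvCombine k (pvCellAt grid i j) (if pvCellAt grid i j ≠ 0 then 1 else 0)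
            (Array.replicate (k + 1).toNat (-1)) (pvSolve grid k (i - 1) j))
          (pvSolve grid k i (j - 1))
          hsh1 hlen1
          (fun c hc => by
            rw [hoff1 i (j - 1) c (by omega)]; exact hleft hj0 c hc)
          hvc1
        rw [pvCellStepA_pos_pos grid k dp i j hi0 hj0]
        refine ⟨hsh2, pvInv_update grid k rows cols i j _ _ hInv
          (fun a b c h => (hoff2 a b c h).trans (hoff1 a b c h)) ?_⟩
        intro c hc
        rw [← hvc2 c hc, hVeq]

lemma pvRow_fold (grid : List (List Int)) (k : Int) (rows cols i : Nat)
    (hi : i < rows) :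
    ∀ (n j0 : Nat) (dp : Array (Array (Array Int))), j0 + n = cols →
    pvShape rows cols (k + 1).toNat dp → pvInv grid k rows cols i j0 dp →
    pvShape rows cols (k + 1).toNat
      ((List.range' j0 n).foldl (fun dp j => pvCellStepA grid k dp i j) dp) ∧
    pvInv grid k rows cols i cols
      ((List.range' j0 n).foldl (fun dp j => pvCellStepA grid k dp i j) dp) := by
  intro n
  induction n with
  | zero =>
      intro j0 dp h hsh hInv
      have hj0 : j0 = cols := by omega
      subst hj0
      exact ⟨hsh, hInv⟩
  | succ m ih =>
      intro j0 dp h hsh hInv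
      rw [List.range'_succ, List.foldl_cons]
      obtain ⟨hsh', hInv'⟩ := pvCell_step grid k rows cols i j0 hi (by omega) dp hsh hInv
      exact ih (j0 + 1) _ (by omega) hsh' hInv'

lemma pvInv_shift (grid : List (List Int)) (k : Int) (rows cols i : Nat)
    (dp : Array (Array (Array Int))) (h : pvInv grid k rows cols i cols dp) :
    pvInv grid k rows cols (i + 1) 0 dp := by
  intro a b c ha hb hc
  have := h a b c ha hb hc
  have hiff : (a < i + 1 ∨ (a = i + 1 ∧ b < 0) ∨ (a = 0 ∧ b = 0)) ↔
      (a < i ∨ (a = i ∧ b < cols) ∨ (a = 0 ∧ b = 0)) := by omega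
  rw [this]; simp only [hiff]

lemma pvOuter_fold (grid : List (List Int)) (k : Int) (rows cols : Nat) :
    ∀ (n i0 : Nat) (dp : Array (Array (Array Int))), i0 + n = rows →
    pvShape rows cols (k + 1).toNat dp → pvInv grid k rows cols i0 0 dp →
    pvShape rows cols (k + 1).toNat
      ((List.range' i0 n).foldl
        (fun dp i => (List.range cols).foldl (fun dp j => pvCellStepA grid k dp i j) dp) dp) ∧
    pvInv grid k rows cols rows 0
      ((List.range' i0 n).foldl
        (fun dp i => (List.range cols).foldl (fun dp j => pvCellStepA grid k dp i j) dp) dp) := by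
  intro n
  induction n with
  | zero =>
      intro i0 dp h hsh hInv
      have hi0 : i0 = rows := by omega
      subst hi0
      exact ⟨hsh, hInv⟩
  | succ m ih =>
      intro i0 dp h hsh hInv
      rw [List.range'_succ, List.foldl_cons]
      have hrow := pvRow_fold grid k rows cols i0 (by omega) cols 0 dp (by omega) hsh hInv
      rw [← List.range_eq_range'] at hrow
      exact ih (i0 + 1) _ (by omega) hrow.1 (pvInv_shift grid k rows cols i0 _ hrow.2)

lemma pvInv_init (grid : List (List Int)) (k : Int) (rows cols : Nat) :
    pvInv grid k rows cols 0 0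
      (pvSet3 (Array.replicate rows (Array.replicate cols (Array.replicate (k + 1).toNat (-1 : Int))))
        0 0 0 0) := by
  intro a b c ha hb hc
  by_cases hab : a = 0 ∧ b = 0
  · obtain ⟨rfl, rfl⟩ := hab
    rw [if_pos (show (0:Nat) < 0 ∨ ((0:Nat) = 0 ∧ (0:Nat) < 0) ∨ ((0:Nat) = 0 ∧ (0:Nat) = 0) by tauto)]
    rw [pvSolve, if_pos (show (0:Nat) = 0 ∧ (0:Nat) = 0 by tauto)]
    have hsh0 := pvShape_init rows cols (k + 1).toNat
    by_cases hc0 : c = 0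
    · subst hc0
      rw [pvGet3_set3_eq _ _ _ _ _ (by rw [hsh0.1]; exact ha)
        (by rw [(hsh0.2 0 ha).1]; exact hb) (by rw [(hsh0.2 0 ha).2 0 hb]; exact hc)]
      rw [pvGetD_set _ 0 0 0 (by simp; omega), if_pos rfl]
    · rw [pvGet3_set3_ne _ _ _ _ _ _ _ _ (by tauto), pvGet3_init rows cols _ _ _ _ ha hb]
      rw [pvGetD_set _ 0 c 0 (by simp; omega), if_neg (fun h => hc0 h.symm)]
      simp [hc]
  · rw [pvGet3_set3_ne _ _ _ _ _ _ _ _ (by tauto), pvGet3_init rows cols _ _ _ _ ha hb,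
      if_neg (show ¬(a < 0 ∨ (a = 0 ∧ b < 0) ∨ (a = 0 ∧ b = 0)) by omega)]

-- ===== VERDICT (by name: the statement is the Claim_ definition above) =====
theorem maxPathScore_spec : Claim_equal_maxPathScore := by
  intro grid k _hDom hPre
  obtain ⟨hk, hne, hcol, _hrows⟩ := hPre
  unfold Spec_maxPathScore
  have hrows0 : 0 < grid.length := List.length_pos_iff.mpr hne
  set rows := grid.length with hrows
  set cols := (grid.getD 0 []).length with hcols
  set dp1 := pvSet3
    (Array.replicate rows (Array.replicate cols (Array.replicate (k + 1).toNat (-1 : Int))))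
    0 0 0 0 with hdp1
  have hsh1 : pvShape rows cols (k + 1).toNat dp1 :=
    pvShape_set3 _ _ _ _ _ _ _ _ (pvShape_init rows cols (k + 1).toNat)
  set dp := (List.range rows).foldl
      (fun dp i => (List.range cols).foldl (fun dp j => pvCellStepA grid k dp i j) dp) dp1
    with hdp
  have hfold : pvShape rows cols (k + 1).toNat dp ∧ pvInv grid k rows cols rows 0 dp := by
    rw [hdp, show List.range rows = List.range' 0 rows from List.range_eq_range']
    exact pvOuter_fold grid k rows cols rows 0 dp1 (by omega) hsh1
      (pvInv_init grid k rows cols)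
  obtain ⟨hsh, hInv⟩ := hfold
  have hcell : ∀ c, c < (k + 1).toNat →
      pvGet3 dp (rows - 1) (cols - 1) c = (pvSolve grid k (rows - 1) (cols - 1))[c]?.getD (-1) := by
    intro c hc
    have heq := hInv (rows - 1) (cols - 1) c (by omega) (by omega) hc
    have hcond : (rows - 1 < rows ∨ (rows - 1 = rows ∧ cols - 1 < 0) ∨ (rows - 1 = 0 ∧ cols - 1 = 0)) := by omega
    rw [heq, if_pos hcond]
  have hlenv : ((dp[rows - 1]?.getD #[])[cols - 1]?.getD #[]).size = (k + 1).toNat :=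
    (hsh.2 (rows - 1) (by omega)).2 (cols - 1) (by omega)
  have hvec : (dp[rows - 1]?.getD #[])[cols - 1]?.getD #[] = pvSolve grid k (rows - 1) (cols - 1) := by
    apply Array.ext (by rw [hlenv, pvSolve_size])
    intro n h1 h2
    have hn : n < (k + 1).toNat := by omega
    have h3 := hcell n hn
    unfold pvGet3 at h3
    rw [Array.getElem?_eq_getElem h1, Array.getElem?_eq_getElem h2] at h3
    exact h3
  have eA : maxPathScore grid k
      = (PySem.List.max? (((dp[rows - 1]?.getD #[])[cols - 1]?.getD #[]).toList) (fun x => x)).getD (-1) := rfl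
  have eB : maxPathScore_alt grid k
      = (PySem.List.max? ((pvSolve grid k (rows - 1) (cols - 1)).toList) (fun x => x)).getD (-1) := rfl
  rw [eA, eB, hvec]
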